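-- pv_equiv track=rewrite | github.com/dtunkelang/y2karaoke | src/y2karaoke/core/visual/bootstrap_ocr.py | _count_dense_line_groups
-- ===== SOURCE A (Python) =====
-- from typing import Any
--
-- def _count_dense_line_groups(words: list[dict[str, Any]]) -> int:
--     if not words:
--         return 0
--     ys = sorted(int(w.get("y", 0)) for w in words if isinstance(w, dict))
--     if not ys:
--         return 0
--     groups: list[list[int]] = [[ys[0]]]
--     for y in ys[1:]:
--         if y - groups[-1][-1] < 22:
--             groups[-1].append(y)
--         else:
--             groups.append([y])
--     return sum(1 for g in groups if len(g) >= 2)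
-- ===== SOURCE B (Python) =====
-- def _count_dense_line_groups(words: list) -> int:
--     if not words:
--         return 0
--     ys = sorted(int(w.get("y", 0)) for w in words if isinstance(w, dict))
--     if not ys:
--         return 0
--     count = 0
--     prev_close = False
--     for prev, cur in zip(ys, ys[1:]):
--         close = cur - prev < 22
--         if close and not prev_close:
--             count += 1
--         prev_close = close
--     return count
-- ===== Notes on version B (the rewrite author's own statement) =====
-- stated objective: simpler
-- what changed: Instead of materialising the groups as lists of lists and then counting those of size >= 2, B scans adjacent pairs of the sorted ys once, counting rising edges of the 'gap < 22' predicate (each edge starts one dense run), keeping only a counter and one boolean.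
import Mathlib
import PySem

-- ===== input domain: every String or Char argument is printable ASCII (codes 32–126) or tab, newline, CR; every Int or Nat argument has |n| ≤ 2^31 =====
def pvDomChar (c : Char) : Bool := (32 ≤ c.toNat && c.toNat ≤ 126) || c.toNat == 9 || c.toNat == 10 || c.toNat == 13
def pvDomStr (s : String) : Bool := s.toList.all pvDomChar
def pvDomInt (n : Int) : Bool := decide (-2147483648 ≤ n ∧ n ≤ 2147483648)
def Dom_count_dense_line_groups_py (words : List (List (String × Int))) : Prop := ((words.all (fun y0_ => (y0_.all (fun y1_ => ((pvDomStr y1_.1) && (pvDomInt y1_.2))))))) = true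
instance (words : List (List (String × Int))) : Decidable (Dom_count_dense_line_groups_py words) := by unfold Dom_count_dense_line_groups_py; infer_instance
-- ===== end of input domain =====

-- B replaces A's explicit list-of-groups construction by a single scan over adjacent pairs of the
-- sorted ys counting rising edges of the 'gap < 22' predicate (objective: simpler, O(1) extra state).


-- ===== PORT A =====
-- the loop 'for y in ys[1:]': groups[-1][-1] via getLastD (groups is never empty),
-- groups[-1].append(y) = dropLast ++ [last.concat y], groups.append([y]) = ++ [[y]]
def pvAGroups (groups : List (List Int)) (ys : List Int) : List (List Int) :=
  match ys with
  | [] => groups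
  | y :: rest =>
    if y - ((groups.getLastD []).getLastD 0) < 22 then
      pvAGroups (groups.dropLast ++ [(groups.getLastD []).concat y]) rest
    else
      pvAGroups (groups ++ [[y]]) rest

def count_dense_line_groups_py (words : List (List (String × Int))) : Int :=
  if words.isEmpty then 0
  else
    -- 'isinstance(w, dict)' is always true under the type convention, so the filter keeps every w;
    -- int() on an int is the identity
    let ys := PySem.List.sorted (words.map (fun w => PySem.Dict.getD (PySem.Dict.mk w) "y" 0)) (fun x => x)
    match ys with
    | [] => 0  -- 'if not ys: return 0'
    | y0 :: rest =>
      Int.ofNat ((pvAGroups [[y0]] rest).countP (fun g => 2 ≤ g.length))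

-- ===== PORT B =====
def pvBStep (s : Int × Bool) (p : Int × Int) : Int × Bool :=
  let close := decide (p.2 - p.1 < 22)
  ((if close ∧ ¬ s.2 then s.1 + 1 else s.1), close)

def count_dense_line_groups_py_alt (words : List (List (String × Int))) : Int :=
  if words.isEmpty then 0
  else
    let ys := PySem.List.sorted (words.map (fun w => PySem.Dict.getD (PySem.Dict.mk w) "y" 0)) (fun x => x)
    match ys with
    | [] => 0
    | _ :: _ => ((ys.zip ys.tail).foldl pvBStep (0, false)).1

-- ===== PRECONDITION & SPEC =====
def Spec_count_dense_line_groups_py (words : List (List (String × Int))) (out : Int) : Prop := out = count_dense_line_groups_py_alt words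
instance (words : List (List (String × Int))) (out : Int) : Decidable (Spec_count_dense_line_groups_py words out) := by unfold Spec_count_dense_line_groups_py; infer_instance

-- ===== CLAIM (what is proved, stated in full; the proofs are below) =====
def Claim_equal_count_dense_line_groups_py : Prop := ∀ (words : List (List (String × Int))), Dom_count_dense_line_groups_py words → Spec_count_dense_line_groups_py words (count_dense_line_groups_py words)

-- ===== LEMMAS AND PROOFS =====

-- invariant: processing rest, A's groups are gs ++ [g] where g is the open group whose last
-- element is the previously seen y; B's state is (count of ≥2-groups so far incl. g, |g| ≥ 2)
theorem pvKey (rest : List Int) : ∀ (gs : List (List Int)) (g : List Int) (prev c : Int) (pc : Bool),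
    g ≠ [] → g.getLastD 0 = prev → pc = decide (2 ≤ g.length) →
    c = Int.ofNat ((gs).countP (fun g => 2 ≤ g.length)) + (if pc then 1 else 0) →
    Int.ofNat ((pvAGroups (gs ++ [g]) rest).countP (fun g => 2 ≤ g.length))
      = (((prev :: rest).zip rest).foldl pvBStep (c, pc)).1 := by
  induction rest with
  | nil =>
    intro gs g prev c pc hg hlast hpc hc
    simp [pvAGroups, List.countP_append, hc]
    cases h2 : decide (2 ≤ g.length) <;> simp [hpc, h2, List.countP_cons] <;>
      simp at h2 <;> omega
  | cons y rest ih =>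
    intro gs g prev c pc hg hlast hpc hc
    have hlen : 1 ≤ g.length := List.length_pos_iff.mpr hg
    have hl : g.getLast?.getD 0 = prev := by rw [← List.getLastD_eq_getLast?]; exact hlast
    by_cases hclose : y - prev < 22
    · have : pvAGroups (gs ++ [g]) (y :: rest)
          = pvAGroups (gs ++ [g.concat y]) rest := by
        simp [pvAGroups, hl, hclose]
      rw [this]
      have hrec := ih gs (g.concat y) y (if pc then c else c + 1) true
        (by simp) (by simp) (by simp; omega) ?_
      · rw [hrec]
        simp only [List.zip_cons_cons, List.foldl_cons]
        have : pvBStep (c, pc) (prev, y) = (if pc then c else c + 1, true) := by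
          simp [pvBStep, hclose]; cases pc <;> simp
        rw [this]
      · cases h2 : decide (2 ≤ g.length) <;> simp [hpc, h2] at hc ⊢ <;> omega
    · have : pvAGroups (gs ++ [g]) (y :: rest)
          = pvAGroups ((gs ++ [g]) ++ [[y]]) rest := by
        simp [pvAGroups, hl, hclose]
      rw [this]
      have hrec := ih (gs ++ [g]) [y] y c false (by simp) (by simp) (by simp) ?_
      · rw [hrec]
        simp only [List.zip_cons_cons, List.foldl_cons]
        have : pvBStep (c, pc) (prev, y) = (c, false) := by
          simp [pvBStep, hclose]
        rw [this]
      · simp [List.countP_append, hc]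
        cases h2 : decide (2 ≤ g.length) <;> simp [hpc, h2] <;> simp at h2 <;> omega

-- ===== VERDICT (by name: the statement is the Claim_ definition above) =====
theorem count_dense_line_groups_py_spec : Claim_equal_count_dense_line_groups_py := by
  intro words _
  unfold Spec_count_dense_line_groups_py count_dense_line_groups_py count_dense_line_groups_py_alt
  by_cases hw : words.isEmpty
  · simp [hw]
  · simp only [hw]
    cases hys : PySem.List.sorted (words.map (fun w => PySem.Dict.getD (PySem.Dict.mk w) "y" 0)) (fun x => x) with
    | nil => rfl
    | cons y0 rest =>
      have := pvKey rest [] [y0] y0 0 false (by simp) (by simp) (by simp) (by simp)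
      simpa using this
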